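-- pv_equiv track=rewrite | github.com/theone-analytics/analytics-dashboard | scripts/generate_dashboard.py | find_page_to_delete
-- ===== SOURCE A (Python) =====
-- def find_page_to_delete(prompt: str, pages: list[str]) -> str | None:
--     prompt_lower = prompt.lower().replace(" ", "")
--
--     # 1. 영문 slug 매칭 (custom_daily_new_users.py → "dailynewusers")
--     for page in pages:
--         name = page.replace("custom_", "").replace(".py", "").replace("_", "")
--         if name in prompt_lower:
--             return page
--
--     # 2. 파일명 직접 매칭 (custom_daily_new_users)
--     for page in pages:
--         filename_no_ext = page.replace(".py", "")
--         if filename_no_ext in prompt_lower.replace(" ", ""):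
--             return page
--
--     # 3. 부분 매칭 (가장 많이 겹치는 페이지)
--     best_match = None
--     best_score = 0
--     for page in pages:
--         parts = page.replace("custom_", "").replace(".py", "").split("_")
--         score = sum(1 for part in parts if part in prompt_lower)
--         if score > best_score:
--             best_score = score
--             best_match = page
--
--     if best_score >= 1:
--         return best_match
--
--     return None
-- ===== SOURCE B (Python) =====
-- def find_page_to_delete(prompt: str, pages: list[str]) -> str | None:
--     # Rank-based selection: assign every page ONE composite rank tuple
--     # (tier, key1, key2) -- tier 0 = slug match, tier 1 = filename match,
--     # tier 2 = partial overlap with key (-score, index) -- and return the page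
--     # with the lexicographically smallest rank.  Replaces A's three
--     # prioritized sequential scans by a single argmin over composite keys.
--     pl = prompt.lower().replace(" ", "")
--
--     def rank(i, page):
--         stem = page.replace("custom_", "").replace(".py", "")
--         if stem.replace("_", "") in pl:
--             return (0, i, 0)
--         if page.replace(".py", "") in pl:
--             return (1, i, 0)
--         score = sum(part in pl for part in stem.split("_"))
--         if score >= 1:
--             return (2, -score, i)
--         return None
--
--     candidates = [(r, p) for i, p in enumerate(pages) if (r := rank(i, p)) is not None]
--     if not candidates:
--         return None
--     return min(candidates, key=lambda t: t[0])[1]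
-- ===== Notes on version B (the rewrite author's own statement) =====
-- stated objective: alternative
-- what changed: Replaces A's three prioritized sequential scans by assigning each page one composite rank tuple (tier, key1, key2) and returning the argmin of those ranks under lexicographic order.
import Mathlib
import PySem

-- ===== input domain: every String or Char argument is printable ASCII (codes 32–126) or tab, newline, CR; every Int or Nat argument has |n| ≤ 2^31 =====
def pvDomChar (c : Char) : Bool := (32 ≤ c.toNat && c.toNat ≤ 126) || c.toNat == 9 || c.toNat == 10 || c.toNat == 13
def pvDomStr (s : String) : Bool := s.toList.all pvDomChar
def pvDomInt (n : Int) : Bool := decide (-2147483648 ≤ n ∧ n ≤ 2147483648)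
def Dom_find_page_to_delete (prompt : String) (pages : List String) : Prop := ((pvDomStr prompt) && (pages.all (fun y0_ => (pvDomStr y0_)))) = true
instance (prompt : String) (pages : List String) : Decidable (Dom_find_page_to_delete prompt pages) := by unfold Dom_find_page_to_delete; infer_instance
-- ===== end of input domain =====

-- B replaces A's three prioritized sequential scans by one composite rank per page and an argmin; same results.

-- shared string transforms (identical in both Pythons)
def fptdSlug (page : String) : String :=
  PySem.Str.replace (PySem.Str.replace (PySem.Str.replace page "custom_" "") ".py" "") "_" ""

def fptdFile (page : String) : String :=
  PySem.Str.replace page ".py" ""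

def fptdScore (pl page : String) : Int :=
  ((PySem.Chars.splitOn (PySem.Str.replace (PySem.Str.replace page "custom_" "") ".py" "").toList ['_']).map
    (fun part => if PySem.Chars.isIn part pl.toList then (1 : Int) else 0)).sum

-- ===== PORT A =====
def fptdLoop1 (pl : String) : List String → Option String
  | [] => none
  | page :: rest => if PySem.Str.isIn (fptdSlug page) pl then some page else fptdLoop1 pl rest

def fptdLoop2 (pl : String) : List String → Option String
  | [] => none
  | page :: rest => if PySem.Str.isIn (fptdFile page) pl then some page else fptdLoop2 pl rest

def fptdStep3 (pl : String) (acc : Option String × Int) (page : String) : Option String × Int :=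
  let score := fptdScore pl page
  if score > acc.2 then (some page, score) else acc

def find_page_to_delete (prompt : String) (pages : List String) : Option String :=
  let pl := PySem.Str.replace (PySem.Str.lower prompt) " " ""
  match fptdLoop1 pl pages with
  | some page => some page
  | none =>
    match fptdLoop2 (PySem.Str.replace pl " " "") pages with
    | some page => some page
    | none =>
      let r := pages.foldl (fptdStep3 pl) (none, 0)
      if r.2 ≥ 1 then r.1 else none

-- ===== PORT B =====
-- Source B's rank(i, page): one composite rank tuple per page
def fptdRank (pl : String) (i : Int) (page : String) : Option (Int × Int × Int) :=
  if PySem.Str.isIn (fptdSlug page) pl then some (0, i, 0)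
  else if PySem.Str.isIn (fptdFile page) pl then some (1, i, 0)
  else
    let score := fptdScore pl page
    if score ≥ 1 then some (2, -score, i) else none

-- Python tuple '<' on the Int triples rank produces (lexicographic)
def fptdLt (a b : Int × Int × Int) : Bool :=
  a.1 < b.1 || (a.1 == b.1 && (a.2.1 < b.2.1 || (a.2.1 == b.2.1 && a.2.2 < b.2.2)))

-- Source B's candidate comprehension over enumerate(pages)
def fptdCands (pl : String) (pages : List String) : List ((Int × Int × Int) × String) :=
  (PySem.List.enumerate pages).filterMap (fun ip => (fptdRank pl ip.1 ip.2).map (fun r => (r, ip.2)))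

def find_page_to_delete_alt (prompt : String) (pages : List String) : Option String :=
  let pl := PySem.Str.replace (PySem.Str.lower prompt) " " ""
  match fptdCands pl pages with
  | [] => none
  | c :: cs =>
    -- min(candidates, key=lambda t: t[0]): first element with minimal key
    some ((cs.foldl (fun acc x => if fptdLt x.1 acc.1 then x else acc) c).2)

-- ===== PRECONDITION & SPEC =====
def Spec_find_page_to_delete (prompt : String) (pages : List String) (out : Option String) : Prop := out = find_page_to_delete_alt prompt pages
instance (prompt : String) (pages : List String) (out : Option String) : Decidable (Spec_find_page_to_delete prompt pages out) := by unfold Spec_find_page_to_delete; infer_instance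

-- ===== CLAIM (what is proved, stated in full; the proofs are below) =====
def Claim_equal_find_page_to_delete : Prop := ∀ (prompt : String) (pages : List String), Dom_find_page_to_delete prompt pages → Spec_find_page_to_delete prompt pages (find_page_to_delete prompt pages)

-- ===== LEMMAS AND PROOFS =====

-- removing all spaces is idempotent: replace ... " " "" yields a space-free string
lemma replace_go_space (fuel : Nat) : ∀ (l acc : List Char), l.length ≤ fuel →
    PySem.Chars.replace.go [' '] [] fuel l acc = acc.reverse ++ l.filter (fun c => !(c == ' ')) := by
  induction fuel with
  | zero =>
    intro l acc h
    cases l with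
    | nil => simp [PySem.Chars.replace.go]
    | cons c t => simp at h
  | succ n ih =>
    intro l acc h
    cases l with
    | nil => simp [PySem.Chars.replace.go]
    | cons c t =>
      rw [PySem.Chars.replace.go]
      by_cases hc : c = ' '
      · subst hc
        simp [List.isPrefixOf, ih t acc (by simpa using Nat.le_of_succ_le_succ h)]
      · have : ([' '].isPrefixOf (c :: t)) = false := by
          simp [List.isPrefixOf]; exact fun h' => hc h'.symm
        simp only [this, Bool.false_eq_true, if_false]
        rw [ih t (c :: acc) (by simpa using Nat.le_of_succ_le_succ h)]
        simp [hc]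

lemma chars_replace_space (l : List Char) :
    PySem.Chars.replace l [' '] [] = l.filter (fun c => !(c == ' ')) := by
  rw [PySem.Chars.replace]
  simp [replace_go_space l.length l [] le_rfl]

lemma str_replace_space_idem (s : String) :
    PySem.Str.replace (PySem.Str.replace s " " "") " " "" = PySem.Str.replace s " " "" := by
  simp [PySem.Str.replace, chars_replace_space, List.filter_filter]

-- fptdLt is a strict linear order: transitivity and negative transitivity
lemma fptdLt_trans (a b c : Int × Int × Int) (h1 : fptdLt a b = true) (h2 : fptdLt b c = true) :
    fptdLt a c = true := by
  obtain ⟨a1, a2, a3⟩ := a; obtain ⟨b1, b2, b3⟩ := b; obtain ⟨c1, c2, c3⟩ := c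
  simp only [fptdLt] at *
  simp only [Bool.or_eq_true, Bool.and_eq_true, decide_eq_true_eq, beq_iff_eq] at *
  omega

lemma fptdLt_negtrans (a b c : Int × Int × Int) (h1 : fptdLt a b = false) (h2 : fptdLt b c = false) :
    fptdLt a c = false := by
  obtain ⟨a1, a2, a3⟩ := a; obtain ⟨b1, b2, b3⟩ := b; obtain ⟨c1, c2, c3⟩ := c
  simp only [fptdLt] at *
  simp only [Bool.or_eq_false_iff, Bool.and_eq_false_iff, decide_eq_false_iff_not, beq_eq_false_iff_ne,
    Bool.or_eq_false_iff] at *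
  omega

-- right-fold formulation of "first element with minimal key"
def fptdMinR : List ((Int × Int × Int) × String) → Option ((Int × Int × Int) × String)
  | [] => none
  | x :: xs =>
    some (match fptdMinR xs with
          | none => x
          | some m => if fptdLt m.1 x.1 then m else x)

lemma foldl_min_eq_minR : ∀ (cs : List ((Int × Int × Int) × String)) (c : (Int × Int × Int) × String),
    cs.foldl (fun acc x => if fptdLt x.1 acc.1 then x else acc) c =
      match fptdMinR cs with
      | none => c
      | some m => if fptdLt m.1 c.1 then m else c := by
  intro cs
  induction cs with
  | nil => intro c; simp [fptdMinR]
  | cons x xs ih =>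
    intro c
    rw [List.foldl_cons, ih]
    cases hm : fptdMinR xs with
    | none =>
      simp only [fptdMinR, hm]
    | some m =>
      simp only [fptdMinR, hm]
      by_cases hxc : fptdLt x.1 c.1 = true
      · simp only [hxc, if_true]
        by_cases hmx : fptdLt m.1 x.1 = true
        · have hmc : fptdLt m.1 c.1 = true := fptdLt_trans _ _ _ hmx hxc
          simp [hmx, hmc]
        · simp [hmx, hxc]
      · simp only [hxc]
        by_cases hmx : fptdLt m.1 x.1 = true
        · simp only [hmx, if_true, Bool.false_eq_true, if_false]
        · have hmc : fptdLt m.1 c.1 = false :=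
            fptdLt_negtrans _ _ _ (by simpa using hmx) (by simpa using hxc)
          simp [hmx, hmc, hxc]

-- A's third loop: threshold-best characterization of the foldl
def fptdG (pl : String) (sc : Int) : List String → Option (String × Int)
  | [] => none
  | p :: r =>
    let s := fptdScore pl p
    if sc < s then some ((fptdG pl s r).getD (p, s)) else fptdG pl sc r

lemma fptdG_pos (pl : String) : ∀ (pages : List String) (sc : Int) (q : String) (t : Int),
    fptdG pl sc pages = some (q, t) → sc < t := by
  intro pages
  induction pages with
  | nil => intro sc q t h; simp [fptdG] at h
  | cons p r ih =>
    intro sc q t h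
    simp only [fptdG] at h
    by_cases hs : sc < fptdScore pl p
    · simp only [hs, if_true] at h
      cases hg : fptdG pl (fptdScore pl p) r with
      | none =>
        simp [hg] at h
        omega
      | some x =>
        obtain ⟨x1, x2⟩ := x
        simp [hg] at h
        have := ih (fptdScore pl p) x1 x2 (by rw [hg])
        omega
    · simp only [hs, if_false] at h
      exact ih sc q t h

lemma fptdG_mono (pl : String) : ∀ (pages : List String) (sc sc' : Int), sc ≤ sc' →
    fptdG pl sc' pages =
      match fptdG pl sc pages with
      | none => none
      | some (q, t) => if sc' < t then some (q, t) else none := by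
  intro pages
  induction pages with
  | nil => intro sc sc' h; simp [fptdG]
  | cons p r ih =>
    intro sc sc' h
    simp only [fptdG]
    by_cases hs' : sc' < fptdScore pl p
    · have hs : sc < fptdScore pl p := lt_of_le_of_lt h hs'
      simp only [hs', hs, if_true]
      cases hg : fptdG pl (fptdScore pl p) r with
      | none => simp [hs']
      | some x =>
        have ht := fptdG_pos pl r (fptdScore pl p) x.1 x.2 (by rw [hg])
        have : sc' < x.2 := lt_trans hs' ht
        simp [this]
    · simp only [hs', if_false]
      by_cases hs : sc < fptdScore pl p
      · simp only [hs, if_true]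
        rw [ih (fptdScore pl p) sc' (by omega)]
        cases hg : fptdG pl (fptdScore pl p) r with
        | none => simp [hs']
        | some x => simp
      · simp only [hs, if_false]
        exact ih sc sc' h

lemma fold3_char (pl : String) : ∀ (pages : List String) (b : Option String) (sc : Int),
    pages.foldl (fptdStep3 pl) (b, sc) =
      match fptdG pl sc pages with
      | none => (b, sc)
      | some (p, s) => (some p, s) := by
  intro pages
  induction pages with
  | nil => intro b sc; simp [fptdG]
  | cons p r ih =>
    intro b sc
    rw [List.foldl_cons]
    simp only [fptdStep3, fptdG]
    by_cases hs : sc < fptdScore pl p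
    · simp only [gt_iff_lt, hs, if_true]
      rw [ih (some p) (fptdScore pl p)]
      cases hg : fptdG pl (fptdScore pl p) r with
      | none => simp
      | some x => simp
    · have : ¬ (fptdScore pl p > sc) := hs
      simp only [gt_iff_lt, this, if_false]
      exact ih b sc

-- recursive form of Source B's candidate list, indices from i0
def fptdCandsFrom (pl : String) (i0 : Int) : List String → List ((Int × Int × Int) × String)
  | [] => []
  | p :: r =>
    match fptdRank pl i0 p with
    | none => fptdCandsFrom pl (i0 + 1) r
    | some c => (c, p) :: fptdCandsFrom pl (i0 + 1) r

lemma cands_eq_candsFrom (pl : String) : ∀ (pages : List String) (i0 : Int),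
    (PySem.List.enumerate pages i0).filterMap (fun ip => (fptdRank pl ip.1 ip.2).map (fun r => (r, ip.2))) =
      fptdCandsFrom pl i0 pages := by
  intro pages
  induction pages with
  | nil => intro i0; simp [PySem.List.enumerate_nil, fptdCandsFrom]
  | cons p r ih =>
    intro i0
    rw [PySem.List.enumerate_cons, List.filterMap_cons]
    simp only [fptdCandsFrom]
    cases hr : fptdRank pl i0 p with
    | none => simp [ih]
    | some c => simp [ih]

-- decidable characterization predicate for the argmin result
def fptdQ (pl : String) (pages : List String) (i0 : Int) : Option ((Int × Int × Int) × String) → Prop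
  | none => fptdLoop1 pl pages = none ∧ fptdLoop2 pl pages = none ∧ fptdG pl 0 pages = none
  | some ((t, k, l), p) =>
      (t = 0 ∧ fptdLoop1 pl pages = some p ∧ i0 ≤ k) ∨
      (t = 1 ∧ fptdLoop1 pl pages = none ∧ fptdLoop2 pl pages = some p ∧ i0 ≤ k) ∨
      (t = 2 ∧ fptdLoop1 pl pages = none ∧ fptdLoop2 pl pages = none ∧
        fptdG pl 0 pages = some (p, -k) ∧ k ≤ -1 ∧ i0 ≤ l)

lemma fptdLt_iff (a b : Int × Int × Int) :
    fptdLt a b = true ↔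
      (a.1 < b.1 ∨ (a.1 = b.1 ∧ (a.2.1 < b.2.1 ∨ (a.2.1 = b.2.1 ∧ a.2.2 < b.2.2)))) := by
  obtain ⟨a1, a2, a3⟩ := a; obtain ⟨b1, b2, b3⟩ := b
  simp [fptdLt]

lemma loop1_cons (pl p : String) (r : List String) :
    fptdLoop1 pl (p :: r) = if PySem.Str.isIn (fptdSlug p) pl then some p else fptdLoop1 pl r := rfl

lemma loop2_cons (pl p : String) (r : List String) :
    fptdLoop2 pl (p :: r) = if PySem.Str.isIn (fptdFile p) pl then some p else fptdLoop2 pl r := rfl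

lemma fptdG_cons (pl : String) (sc : Int) (p : String) (r : List String) :
    fptdG pl sc (p :: r) =
      if sc < fptdScore pl p then some ((fptdG pl (fptdScore pl p) r).getD (p, fptdScore pl p))
      else fptdG pl sc r := rfl

lemma candsFrom_cons (pl : String) (i0 : Int) (p : String) (r : List String) :
    fptdCandsFrom pl i0 (p :: r) =
      match fptdRank pl i0 p with
      | none => fptdCandsFrom pl (i0 + 1) r
      | some c => (c, p) :: fptdCandsFrom pl (i0 + 1) r := rfl

lemma rank_slug (pl : String) (i : Int) (p : String)
    (h1 : PySem.Str.isIn (fptdSlug p) pl = true) :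
    fptdRank pl i p = some (0, i, 0) := by
  unfold fptdRank; rw [if_pos h1]

lemma rank_file (pl : String) (i : Int) (p : String)
    (h1 : PySem.Str.isIn (fptdSlug p) pl = false)
    (h2 : PySem.Str.isIn (fptdFile p) pl = true) :
    fptdRank pl i p = some (1, i, 0) := by
  unfold fptdRank; rw [if_neg (by rw [h1]; simp), if_pos h2]

lemma rank_score (pl : String) (i : Int) (p : String)
    (h1 : PySem.Str.isIn (fptdSlug p) pl = false)
    (h2 : PySem.Str.isIn (fptdFile p) pl = false)
    (hsc : fptdScore pl p ≥ 1) :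
    fptdRank pl i p = some (2, -fptdScore pl p, i) := by
  unfold fptdRank
  rw [if_neg (by rw [h1]; simp), if_neg (by rw [h2]; simp), if_pos hsc]

lemma rank_none (pl : String) (i : Int) (p : String)
    (h1 : PySem.Str.isIn (fptdSlug p) pl = false)
    (h2 : PySem.Str.isIn (fptdFile p) pl = false)
    (hsc : ¬ fptdScore pl p ≥ 1) :
    fptdRank pl i p = none := by
  unfold fptdRank
  rw [if_neg (by rw [h1]; simp), if_neg (by rw [h2]; simp), if_neg hsc]

-- master characterization of the argmin against A's three scans
set_option maxHeartbeats 1000000 in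
lemma minR_char (pl : String) : ∀ (pages : List String) (i0 : Int),
    fptdQ pl pages i0 (fptdMinR (fptdCandsFrom pl i0 pages)) := by
  intro pages
  induction pages with
  | nil =>
    intro i0
    simp [fptdCandsFrom, fptdMinR, fptdQ, fptdLoop1, fptdLoop2, fptdG]
  | cons p r ih =>
    intro i0
    have IH := ih (i0 + 1)
    rw [candsFrom_cons]
    by_cases h1 : PySem.Str.isIn (fptdSlug p) pl = true
    · -- head is a slug match: rank (0, i0, 0)
      have e1 : fptdLoop1 pl (p :: r) = some p := by rw [loop1_cons, if_pos h1]
      rw [rank_slug pl i0 p h1]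
      cases hm : fptdMinR (fptdCandsFrom pl (i0 + 1) r) with
      | none =>
        simp only [fptdMinR, hm, fptdQ]
        refine Or.inl ⟨by simp, e1, by simp⟩
      | some m =>
        rw [hm] at IH
        obtain ⟨⟨t, k, l⟩, q⟩ := m
        simp only [fptdQ] at IH
        have hbound : 0 ≤ t ∧ (t = 0 → i0 + 1 ≤ k) := by
          rcases IH with ⟨ht, _, hk⟩ | ⟨ht, _⟩ | ⟨ht, _⟩ <;> omega
        have hlt : fptdLt (t, k, l) (0, i0, 0) = false := by
          rw [Bool.eq_false_iff, Ne, fptdLt_iff]; dsimp only; omega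
        simp only [fptdMinR, hm, hlt, Bool.false_eq_true, if_false, fptdQ]
        refine Or.inl ⟨by simp, e1, by simp⟩
    · rw [Bool.not_eq_true] at h1
      have e1 : fptdLoop1 pl (p :: r) = fptdLoop1 pl r := by
        rw [loop1_cons, if_neg (by rw [h1]; simp)]
      by_cases h2 : PySem.Str.isIn (fptdFile p) pl = true
      · -- head is a filename match: rank (1, i0, 0)
        have e2 : fptdLoop2 pl (p :: r) = some p := by rw [loop2_cons, if_pos h2]
        rw [rank_file pl i0 p h1 h2]
        cases hm : fptdMinR (fptdCandsFrom pl (i0 + 1) r) with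
        | none =>
          rw [hm] at IH
          simp only [fptdQ] at IH
          simp only [fptdMinR, hm, fptdQ]
          exact Or.inr (Or.inl ⟨by simp, by rw [e1, IH.1], e2, by simp⟩)
        | some m =>
          rw [hm] at IH
          obtain ⟨⟨t, k, l⟩, q⟩ := m
          simp only [fptdQ] at IH
          rcases IH with ⟨ht, hl1, hk⟩ | ⟨ht, hl1, hl2, hk⟩ | ⟨ht, hl1, hl2, hg, hk, hl⟩
          · -- rest has a slug match: it wins
            have hlt : fptdLt (t, k, l) (1, i0, 0) = true := by
              rw [fptdLt_iff]; dsimp only; omega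
            simp only [fptdMinR, hm, hlt, if_true, fptdQ]
            exact Or.inl ⟨ht, by rw [e1, hl1], by omega⟩
          · -- rest's best is a filename match at a later index: head wins
            have hlt : fptdLt (t, k, l) (1, i0, 0) = false := by
              rw [Bool.eq_false_iff, Ne, fptdLt_iff]; dsimp only; omega
            simp only [fptdMinR, hm, hlt, Bool.false_eq_true, if_false, fptdQ]
            exact Or.inr (Or.inl ⟨by simp, by rw [e1, hl1], e2, by simp⟩)
          · -- rest's best is a partial match: head wins
            have hlt : fptdLt (t, k, l) (1, i0, 0) = false := by
              rw [Bool.eq_false_iff, Ne, fptdLt_iff]; dsimp only; omega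
            simp only [fptdMinR, hm, hlt, Bool.false_eq_true, if_false, fptdQ]
            exact Or.inr (Or.inl ⟨by simp, by rw [e1, hl1], e2, by simp⟩)
      · -- head matches neither tier 0 nor tier 1
        rw [Bool.not_eq_true] at h2
        have e2 : fptdLoop2 pl (p :: r) = fptdLoop2 pl r := by
          rw [loop2_cons, if_neg (by rw [h2]; simp)]
        rcases (by omega : fptdScore pl p ≥ 1 ∨ fptdScore pl p < 1) with hsc | hsc
        · -- head scores: rank (2, -score, i0)
          rw [rank_score pl i0 p h1 h2 hsc]
          cases hm : fptdMinR (fptdCandsFrom pl (i0 + 1) r) with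
          | none =>
            rw [hm] at IH
            simp only [fptdQ] at IH
            obtain ⟨hl1, hl2, hg⟩ := IH
            have hgs : fptdG pl (fptdScore pl p) r = none := by
              rw [fptdG_mono pl r 0 (fptdScore pl p) (by omega), hg]
            have eg : fptdG pl 0 (p :: r) = some (p, fptdScore pl p) := by
              rw [fptdG_cons, if_pos (by omega), hgs]; rfl
            simp only [fptdMinR, hm, fptdQ]
            refine Or.inr (Or.inr ⟨by simp, by rw [e1, hl1], by rw [e2, hl2], by rw [eg]; simp, by omega, by simp⟩)
          | some m =>
            rw [hm] at IH
            obtain ⟨⟨t, k, l⟩, q⟩ := m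
            simp only [fptdQ] at IH
            rcases IH with ⟨ht, hl1, hk⟩ | ⟨ht, hl1, hl2, hk⟩ | ⟨ht, hl1, hl2, hg, hk, hl⟩
            · have hlt : fptdLt (t, k, l) (2, -fptdScore pl p, i0) = true := by
                rw [fptdLt_iff]; dsimp only; omega
              simp only [fptdMinR, hm, hlt, if_true, fptdQ]
              exact Or.inl ⟨ht, by rw [e1, hl1], by omega⟩
            · have hlt : fptdLt (t, k, l) (2, -fptdScore pl p, i0) = true := by
                rw [fptdLt_iff]; dsimp only; omega
              simp only [fptdMinR, hm, hlt, if_true, fptdQ]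
              exact Or.inr (Or.inl ⟨ht, by rw [e1, hl1], by rw [e2, hl2], by omega⟩)
            · by_cases hklt : k < -fptdScore pl p
              · -- rest's partial match scores strictly higher: it wins
                have hlt : fptdLt (t, k, l) (2, -fptdScore pl p, i0) = true := by
                  rw [fptdLt_iff]; dsimp only; omega
                have hgs : fptdG pl (fptdScore pl p) r = some (q, -k) := by
                  rw [fptdG_mono pl r 0 (fptdScore pl p) (by omega), hg]
                  exact if_pos (by omega)
                have eg : fptdG pl 0 (p :: r) = some (q, -k) := by
                  rw [fptdG_cons, if_pos (by omega), hgs]; rfl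
                simp only [fptdMinR, hm, hlt, if_true, fptdQ]
                exact Or.inr (Or.inr ⟨ht, by rw [e1, hl1], by rw [e2, hl2], by rw [eg], by omega, by omega⟩)
              · -- head's score at an earlier index wins (≥, first-wins)
                have hlt : fptdLt (t, k, l) (2, -fptdScore pl p, i0) = false := by
                  rw [Bool.eq_false_iff, Ne, fptdLt_iff]; dsimp only; omega
                have hgs : fptdG pl (fptdScore pl p) r = none := by
                  rw [fptdG_mono pl r 0 (fptdScore pl p) (by omega), hg]
                  exact if_neg (by omega)
                have eg : fptdG pl 0 (p :: r) = some (p, fptdScore pl p) := by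
                  rw [fptdG_cons, if_pos (by omega), hgs]; rfl
                simp only [fptdMinR, hm, hlt, Bool.false_eq_true, if_false, fptdQ]
                refine Or.inr (Or.inr ⟨by simp, by rw [e1, hl1], by rw [e2, hl2], by rw [eg]; simp, by omega, by simp⟩)
        · -- head contributes no candidate at all
          rw [rank_none pl i0 p h1 h2 (by omega)]
          show fptdQ pl (p :: r) i0 (fptdMinR (fptdCandsFrom pl (i0 + 1) r))
          have eg : fptdG pl 0 (p :: r) = fptdG pl 0 r := by
            rw [fptdG_cons, if_neg (by omega)]
          cases hm : fptdMinR (fptdCandsFrom pl (i0 + 1) r) with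
          | none =>
            rw [hm] at IH
            simp only [fptdQ] at IH
            simp only [fptdQ]
            exact ⟨by rw [e1, IH.1], by rw [e2, IH.2.1], by rw [eg]; exact IH.2.2⟩
          | some m =>
            rw [hm] at IH
            obtain ⟨⟨t, k, l⟩, q⟩ := m
            simp only [fptdQ] at IH
            simp only [fptdQ]
            rcases IH with ⟨ht, hl1, hk⟩ | ⟨ht, hl1, hl2, hk⟩ | ⟨ht, hl1, hl2, hg, hk, hl⟩
            · exact Or.inl ⟨ht, by rw [e1, hl1], by omega⟩
            · exact Or.inr (Or.inl ⟨ht, by rw [e1, hl1], by rw [e2, hl2], by omega⟩)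
            · exact Or.inr (Or.inr ⟨ht, by rw [e1, hl1], by rw [e2, hl2], by rw [eg]; exact hg, by omega, by omega⟩)

-- core equality for a fixed (already lowered, space-free) prompt string
lemma main_eq (pl : String) (pages : List String) :
    (match fptdLoop1 pl pages with
     | some page => some page
     | none =>
       match fptdLoop2 pl pages with
       | some page => some page
       | none =>
         let r := pages.foldl (fptdStep3 pl) (none, 0)
         if r.2 ≥ 1 then r.1 else none) =
    (match fptdCandsFrom pl 0 pages with
     | [] => none
     | c :: cs =>
       some ((cs.foldl (fun acc x => if fptdLt x.1 acc.1 then x else acc) c).2)) := by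
  have hq := minR_char pl pages 0
  cases hc : fptdCandsFrom pl 0 pages with
  | nil =>
    rw [hc] at hq
    simp only [fptdMinR, fptdQ] at hq
    obtain ⟨hl1, hl2, hg⟩ := hq
    rw [hl1, hl2]
    simp only [fold3_char pl pages none 0, hg]
    norm_num
  | cons c cs =>
    rw [hc] at hq
    show _ = some ((cs.foldl (fun acc x => if fptdLt x.1 acc.1 then x else acc) c).2)
    rw [foldl_min_eq_minR cs c]
    simp only [fptdMinR] at hq ⊢
    generalize hgen : (match fptdMinR cs with
      | none => c
      | some m => if fptdLt m.1 c.1 then m else c) = m at hq ⊢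
    obtain ⟨⟨t, k, l⟩, q⟩ := m
    simp only [fptdQ] at hq
    rcases hq with ⟨ht, hl1, hk⟩ | ⟨ht, hl1, hl2, hk⟩ | ⟨ht, hl1, hl2, hg, hk, hl⟩
    · rw [hl1]
    · rw [hl1, hl2]
    · rw [hl1, hl2]
      simp only [fold3_char pl pages none 0, hg]
      rw [if_pos (by omega : (-k : Int) ≥ 1)]

-- ===== VERDICT (by name: the statement is the Claim_ definition above) =====
theorem find_page_to_delete_spec : Claim_equal_find_page_to_delete := by
  intro prompt pages _
  unfold Spec_find_page_to_delete find_page_to_delete find_page_to_delete_alt fptdCands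
  simp only [str_replace_space_idem, cands_eq_candsFrom]
  exact main_eq (PySem.Str.replace (PySem.Str.lower prompt) " " "") pages
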